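-- pv_equiv track=rewrite | github.com/NahomSeleshi/A2SV_RemoteEducation | Mice_and_cheese.py | miceAndCheese
-- ===== SOURCE A (Python) =====
-- from typing import List
--
-- def miceAndCheese(reward1: List[int], reward2: List[int], k: int) -> int:
--     reward_difference = []
--     for i in range(len(reward1)):
--         reward_difference.append((reward1[i]-reward2[i], i))
--     reward_difference.sort(reverse = True)
--
--     max_points = 0
--     for i in range(len(reward_difference)):
--         if i < k:
--             max_points += reward1[reward_difference[i][1]]
--         else:
--             max_points += reward2[reward_difference[i][1]]
--
--     return max_points
-- ===== SOURCE B (Python) =====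
-- def miceAndCheese(reward1, reward2, k):
--     # One pass, no sorting: keep a pool `top` of the k largest differences
--     # seen so far (replace the pool's minimum when a larger difference arrives).
--     total = 0
--     top = []
--     for a, b in zip(reward1, reward2):
--         total += b
--         d = a - b
--         if len(top) < k:
--             top.append(d)
--         elif top:
--             m = min(top)
--             if d > m:
--                 top[top.index(m)] = d
--     return total + sum(top)
-- ===== Notes on version B (the rewrite author's own statement) =====
-- stated objective: alternative
-- what changed: B replaces A's sort entirely: no (diff,index) list, no sort and no i<k branch over sorted positions; instead a single pass over zip(reward1,reward2) accumulates sum(reward2) and maintains a bounded pool of the k largest differences by replacing the pool's minimum, returning total + sum(pool).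
import Mathlib
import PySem

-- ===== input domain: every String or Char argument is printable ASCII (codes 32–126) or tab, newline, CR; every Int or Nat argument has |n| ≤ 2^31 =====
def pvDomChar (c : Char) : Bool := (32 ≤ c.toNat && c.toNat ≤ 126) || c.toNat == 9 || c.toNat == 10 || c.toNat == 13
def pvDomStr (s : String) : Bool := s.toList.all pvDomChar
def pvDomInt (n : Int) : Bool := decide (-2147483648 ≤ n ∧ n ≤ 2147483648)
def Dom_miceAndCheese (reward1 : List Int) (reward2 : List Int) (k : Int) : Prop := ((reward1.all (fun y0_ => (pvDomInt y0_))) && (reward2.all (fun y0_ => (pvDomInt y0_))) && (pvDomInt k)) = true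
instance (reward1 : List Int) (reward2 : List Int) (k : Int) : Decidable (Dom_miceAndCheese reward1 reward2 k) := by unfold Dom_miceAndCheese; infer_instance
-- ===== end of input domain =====

-- B drops A's sort-and-index algorithm: a single pass over zip(reward1, reward2)
-- accumulates sum(reward2) and maintains a bounded pool of the k largest
-- differences (replace the pool's minimum); objective: alternative (not faster).

-- ===== PORT A =====
def miceAndCheese (reward1 : List Int) (reward2 : List Int) (k : Int) : Int :=
  let rd := (PySem.List.pyRange 0 (reward1.length : Int) 1).foldl
      (fun acc i => acc ++ [(PySem.List.pyGetD reward1 i 0 - PySem.List.pyGetD reward2 i 0, i)]) []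
  let rds := PySem.List.sorted2 rd (fun p => p.1) (fun p => p.2) true
  (PySem.List.pyRange 0 (rds.length : Int) 1).foldl
    (fun acc i =>
      if i < k then acc + PySem.List.pyGetD reward1 (PySem.List.pyGetD rds i (0, 0)).2 0
      else acc + PySem.List.pyGetD reward2 (PySem.List.pyGetD rds i (0, 0)).2 0) 0

-- ===== PORT B =====
-- loop body of B: total += b; d = a - b; then update the pool `top`
def pvStep (k : Int) (st : Int × List Int) (p : Int × Int) : Int × List Int :=
  let total := st.1 + p.2
  let d := p.1 - p.2
  let top := st.2
  if (top.length : Int) < k then (total, top ++ [d])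
  else
    -- 'elif top: m = min(top); if d > m: top[top.index(m)] = d'
    match PySem.List.min? top (fun x => x) with
    | none => (total, top)                       -- pool empty (k ≤ 0)
    | some m =>
      if m < d then
        match PySem.List.index? top m with
        | some i => (total, top.set i d)         -- index? always finds the min
        | none => (total, top)
      else (total, top)

def miceAndCheese_alt (reward1 : List Int) (reward2 : List Int) (k : Int) : Int :=
  let st := (reward1.zip reward2).foldl (pvStep k) (0, [])
  st.1 + st.2.sum

-- ===== PRECONDITION & SPEC =====
-- A raises IndexError (reward2[i]) when reward2 is shorter than reward1; excluded.
def Pre_miceAndCheese (reward1 : List Int) (reward2 : List Int) (k : Int) : Prop :=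
  reward1.length ≤ reward2.length
instance (reward1 : List Int) (reward2 : List Int) (k : Int) : Decidable (Pre_miceAndCheese reward1 reward2 k) := by unfold Pre_miceAndCheese; infer_instance
def pvWitness_miceAndCheese : List Int × List Int × Int := ([4, 1, 2], [2, 3, 5], 2)

def Spec_miceAndCheese (reward1 : List Int) (reward2 : List Int) (k : Int) (out : Int) : Prop := out = miceAndCheese_alt reward1 reward2 k
instance (reward1 : List Int) (reward2 : List Int) (k : Int) (out : Int) : Decidable (Spec_miceAndCheese reward1 reward2 k out) := by unfold Spec_miceAndCheese; infer_instance

-- ===== CLAIM (what is proved, stated in full; the proofs are below) =====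
def Claim_equal_miceAndCheese : Prop := ∀ (reward1 : List Int) (reward2 : List Int) (k : Int), Dom_miceAndCheese reward1 reward2 k → Pre_miceAndCheese reward1 reward2 k → Spec_miceAndCheese reward1 reward2 k (miceAndCheese reward1 reward2 k)

-- ===== LEMMAS AND PROOFS =====

-- abbreviations used only by the proofs
def pvSd (xs : List Int) : List Int := PySem.List.sorted xs (fun x => x) true
def pvIns (d : Int) (l : List Int) : List Int :=
  PySem.List.insertBy (fun a b => decide (b < a)) d l
-- top-pool component of pvStep
def pvStepTop (k : Int) (top : List Int) (d : Int) : List Int :=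
  if (top.length : Int) < k then top ++ [d]
  else
    match PySem.List.min? top (fun x => x) with
    | none => top
    | some m =>
      if m < d then
        match PySem.List.index? top m with
        | some i => top.set i d
        | none => top
      else top

lemma pvStep_eq (k : Int) (st : Int × List Int) (p : Int × Int) :
    pvStep k st p = (st.1 + p.2, pvStepTop k st.2 (p.1 - p.2)) := by
  unfold pvStep pvStepTop
  dsimp only
  by_cases h : (st.2.length : Int) < k
  · simp [h]
  · simp only [if_neg h]
    cases hm : PySem.List.min? st.2 (fun x => x) with
    | none => simp
    | some m =>
      by_cases hd : m < p.1 - p.2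
      · simp only [if_pos hd]
        cases PySem.List.index? st.2 m <;> simp
      · simp [hd]

lemma fold_pair (k : Int) :
    ∀ (ps : List (Int × Int)) (t : Int) (top : List Int),
      ps.foldl (pvStep k) (t, top)
        = (t + (ps.map (fun p => p.2)).sum,
           (ps.map (fun p => p.1 - p.2)).foldl (pvStepTop k) top) := by
  intro ps
  induction ps with
  | nil => intro t top; simp
  | cons p ps ih =>
    intro t top
    rw [List.foldl_cons, pvStep_eq, ih]
    simp [add_assoc]

lemma perm_pvIns (d : Int) (l : List Int) : (pvIns d l).Perm (d :: l) := by
  induction l with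
  | nil => simp [pvIns, PySem.List.insertBy]
  | cons x t ih =>
    unfold pvIns PySem.List.insertBy
    by_cases h : x < d
    · simp [h]
    · simp only [decide_eq_true_eq, h, if_neg, not_false_iff]
      exact ((ih.cons x).trans (List.Perm.swap d x t)).symm.symm

lemma length_pvIns (d : Int) (l : List Int) : (pvIns d l).length = l.length + 1 :=
  (perm_pvIns d l).length_eq

lemma pvSd_snoc (ds : List Int) (d : Int) : pvSd (ds ++ [d]) = pvIns d (pvSd ds) := by
  unfold pvSd pvIns
  rw [PySem.List.sorted_rev_eq_foldl_insertBy, PySem.List.sorted_rev_eq_foldl_insertBy,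
    List.foldl_append, List.foldl_cons, List.foldl_nil]

lemma pvSd_pairwise (xs : List Int) : (pvSd xs).Pairwise (fun a b => b ≤ a) :=
  PySem.List.sorted_pairwise_rev xs (fun x => x)

lemma pvIns_cons_of_lt {x d : Int} (h : x < d) (t : List Int) :
    pvIns d (x :: t) = d :: x :: t := by
  simp [pvIns, PySem.List.insertBy, h]

lemma pvIns_cons_of_ge {x d : Int} (h : ¬ x < d) (t : List Int) :
    pvIns d (x :: t) = x :: pvIns d t := by
  simp [pvIns, PySem.List.insertBy, h]

-- inserting d ≤ S[kk-1] into a descending S does not change the first kk elements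
lemma take_pvIns_le (d : Int) :
    ∀ (S : List Int) (kk : Nat), S.Pairwise (fun a b => b ≤ a) →
      ∀ (hk : kk ≤ S.length) (h0 : 0 < kk), d ≤ S[kk - 1] →
        (pvIns d S).take kk = S.take kk := by
  intro S
  induction S with
  | nil => intro kk _ hk h0 _; exact absurd hk (by simp; omega)
  | cons x t ih =>
    intro kk hp hk h0 hd
    obtain ⟨m, rfl⟩ : ∃ m, kk = m + 1 := ⟨kk - 1, by omega⟩
    simp only [Nat.add_sub_cancel] at hd ⊢
    rcases Nat.eq_zero_or_pos m with hm | hm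
    · subst hm
      have hx : ¬ x < d := by simp at hd; omega
      rw [pvIns_cons_of_ge hx]; simp
    · obtain ⟨j, rfl⟩ : ∃ j, m = j + 1 := ⟨m - 1, by omega⟩
      rw [List.getElem_cons_succ] at hd
      have hx : ¬ x < d := by
        have ht : t[j]'(by simp at hk; omega) ∈ t := List.getElem_mem _
        have := (List.pairwise_cons.mp hp).1 _ ht
        omega
      rw [pvIns_cons_of_ge hx, List.take_succ_cons, List.take_succ_cons]
      congr 1
      have := ih (j + 1) (List.pairwise_cons.mp hp).2 (by simp at hk; omega)
        (by omega) (by simpa using hd)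
      simpa using this

lemma pvIns_nil (d : Int) : pvIns d [] = [d] := rfl

-- inserting d > S[kk-1]: the first kk of the result are d inserted into take (kk-1)
lemma take_pvIns_gt (d : Int) :
    ∀ (S : List Int) (kk : Nat), S.Pairwise (fun a b => b ≤ a) →
      ∀ (hk : kk ≤ S.length) (h0 : 0 < kk), S[kk - 1] < d →
        (pvIns d S).take kk = pvIns d (S.take (kk - 1)) := by
  intro S
  induction S with
  | nil => intro kk _ hk h0 _; exact absurd hk (by simp; omega)
  | cons x t ih =>
    intro kk hp hk h0 hd
    obtain ⟨m, rfl⟩ : ∃ m, kk = m + 1 := ⟨kk - 1, by omega⟩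
    simp only [Nat.add_sub_cancel] at hd ⊢
    by_cases hx : x < d
    · rw [pvIns_cons_of_lt hx, List.take_succ_cons]
      rcases Nat.eq_zero_or_pos m with hm | hm
      · subst hm; simp [pvIns_nil]
      · obtain ⟨j, rfl⟩ : ∃ j, m = j + 1 := ⟨m - 1, by omega⟩
        rw [List.take_succ_cons, pvIns_cons_of_lt hx]
    · rw [pvIns_cons_of_ge hx]
      rcases Nat.eq_zero_or_pos m with hm | hm
      · subst hm; simp at hd; omega
      · obtain ⟨j, rfl⟩ : ∃ j, m = j + 1 := ⟨m - 1, by omega⟩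
        rw [List.take_succ_cons, List.take_succ_cons, pvIns_cons_of_ge hx]
        congr 1
        have hd' : t[j]'(by simp at hk; omega) < d := by
          rw [List.getElem_cons_succ] at hd; exact hd

        have := ih (j + 1) (List.pairwise_cons.mp hp).2 (by simp at hk; omega)
          (by omega) (by simpa using hd')
        simpa using this

lemma set_at_length {α : Type} (pre : List α) (m d : α) (suf : List α) :
    (pre ++ m :: suf).set pre.length d = pre ++ d :: suf := by
  induction pre with
  | nil => rfl
  | cons x p ih => simp [ih]

-- replacing the first occurrence of the minimum by d, decomposed
lemma set_index_perm {top : List Int} {m : Int} {i : Nat} (d : Int)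
    (hidx : PySem.List.index? top m = some i) :
    ∃ pre suf, top = pre ++ m :: suf ∧ top.set i d = pre ++ d :: suf := by
  obtain ⟨pre, suf, htop, hlen, _⟩ := (PySem.List.index?_eq_some_iff top m i).mp hidx
  exact ⟨pre, suf, htop, by rw [htop, ← hlen, set_at_length]⟩

-- the one-step selection lemma: if the pool holds the k largest of what was seen,
-- it holds the k largest after seeing d as well
lemma step_perm (k : Int) (S top : List Int) (d : Int)
    (hS : S.Pairwise (fun a b => b ≤ a))
    (hp : top.Perm (S.take k.toNat)) :
    (pvStepTop k top d).Perm ((pvIns d S).take k.toNat) := by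
  have hlen : top.length = min k.toNat S.length := by
    rw [hp.length_eq, List.length_take]
  by_cases hk : (top.length : Int) < k
  · have hSlen : S.length < k.toNat := by omega
    rw [pvStepTop, if_pos hk, List.take_of_length_le (by rw [length_pvIns]; omega)]
    refine (List.perm_append_singleton d top).trans ((hp.cons d).trans ?_)
    rw [List.take_of_length_le (by omega)]
    exact (perm_pvIns d S).symm
  · rw [pvStepTop, if_neg hk]
    have hkk : k.toNat ≤ S.length := by omega
    have htlen : top.length = k.toNat := by omega
    rcases Nat.eq_zero_or_pos k.toNat with h0 | h0
    · have htop : top = [] := List.length_eq_zero_iff.mp (by omega)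
      subst htop
      rw [(PySem.List.min?_eq_none_iff [] (fun x : Int => x)).mpr rfl]
      simp [h0]
    · have hmi : k.toNat - 1 < S.length := by omega
      cases hm : PySem.List.min? top (fun x : Int => x) with
      | none =>
        have h : top = [] := (PySem.List.min?_eq_none_iff ..).mp hm
        rw [h] at htlen; simp at htlen; omega
      | some m =>
        -- the pool's minimum value is S[k-1]
        have hTfact : ∀ i, (hi : i < k.toNat) → S[k.toNat - 1] ≤ S[i]'(by omega) := by
          intro i hi
          rcases Nat.lt_or_ge i (k.toNat - 1) with h | h
          · exact (List.pairwise_iff_getElem.mp hS) i (k.toNat - 1) (by omega) (by omega) h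
          · have : i = k.toNat - 1 := by omega
            subst this; exact le_refl _
        have hmin_le : m ≤ S[k.toNat - 1] := by
          have hmem : S[k.toNat - 1] ∈ top := by
            refine hp.symm.subset ?_
            have : S[k.toNat - 1] = (S.take k.toNat)[k.toNat - 1]'(by
              rw [List.length_take]; omega) := (List.getElem_take).symm
            rw [this]; exact List.getElem_mem _
          simpa using PySem.List.min?_isMin hm _ hmem
        have hle_min : S[k.toNat - 1] ≤ m := by
          have hmem : m ∈ S.take k.toNat := hp.subset (PySem.List.min?_mem hm)
          obtain ⟨i, hi, hval⟩ := List.mem_iff_getElem.mp hmem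
          have hi' : i < k.toNat := by rw [List.length_take] at hi; omega
          have : S[k.toNat - 1] ≤ (S.take k.toNat)[i] := by
            rw [List.getElem_take]; exact hTfact i hi'
          omega
        have hmval : m = S[k.toNat - 1] := le_antisymm hmin_le hle_min
        dsimp only
        by_cases hd : m < d
        · rw [if_pos hd]
          cases hidx : PySem.List.index? top m with
          | none => exact absurd (PySem.List.min?_mem hm) ((PySem.List.index?_eq_none_iff ..).mp hidx)
          | some i =>
            dsimp only
            obtain ⟨pre, suf, htop, hset⟩ := set_index_perm d hidx
            rw [hset, take_pvIns_gt d S k.toNat hS hkk h0 (by omega)]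
            have htake : S.take k.toNat = S.take (k.toNat - 1) ++ [S[k.toNat - 1]] := by
              have h1 : S.take (k.toNat - 1 + 1) = S.take (k.toNat - 1) ++ [S[k.toNat - 1]] := by
                rw [List.take_add_one]
                simp [List.getElem?_eq_getElem hmi]
              have h2 : k.toNat - 1 + 1 = k.toNat := by omega
              rw [h2] at h1
              exact h1
            have hps : (pre ++ suf).Perm (S.take (k.toNat - 1)) := by
              have h1 : (m :: (pre ++ suf)).Perm (S.take k.toNat) := by
                refine List.perm_middle.symm.trans ?_
                rw [← htop]; exact hp
              rw [htake, ← hmval] at h1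
              exact (h1.trans (List.perm_append_singleton m _)).cons_inv
            exact List.perm_middle.trans ((hps.cons d).trans (perm_pvIns d _).symm)
        · rw [if_neg hd, take_pvIns_le d S k.toNat hS hkk h0 (by omega)]
          exact hp

-- pool invariant: after processing ds the pool is (a permutation of) the k largest of ds
lemma pool_inv (k : Int) (ds : List Int) :
    (ds.foldl (pvStepTop k) []).Perm ((pvSd ds).take k.toNat) := by
  induction ds using List.reverseRecOn with
  | nil => have h : pvSd [] = [] := rfl; simp [h]
  | append_singleton ds d ih =>
    rw [List.foldl_append, List.foldl_cons, List.foldl_nil, pvSd_snoc]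
    exact step_perm k (pvSd ds) _ d (pvSd_pairwise ds) ih

-- A's value, characterised: sum(reward2) + sum of the k largest differences
lemma loop_sum (g1 g2 : Int → Int) (k : Int) :
    ∀ (s : List (Int × Int)) (j acc : Int),
      (∀ p ∈ s, p.1 = g1 p.2 - g2 p.2) →
      (PySem.List.enumerate s j).foldl
          (fun acc ip => if ip.1 < k then acc + g1 ip.2.2 else acc + g2 ip.2.2) acc
        = acc + (s.map (fun p => g2 p.2)).sum + ((s.map (fun p => p.1)).take (k - j).toNat).sum := by
  intro s
  induction s with
  | nil => intro j acc _; simp [PySem.List.enumerate]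
  | cons p s ih =>
    intro j acc hs
    rw [PySem.List.enumerate_cons, List.foldl_cons]
    by_cases hj : j < k
    · have ht : (k - j).toNat = (k - (j + 1)).toNat + 1 := by omega
      rw [if_pos hj, ih (j + 1) _ (fun q hq => hs q (List.mem_cons_of_mem _ hq))]
      have hp := hs p (List.mem_cons_self ..)
      simp [ht, List.take_succ_cons]
      omega
    · have ht : (k - j).toNat = 0 := by omega
      have ht' : (k - (j + 1)).toNat = 0 := by omega
      rw [if_neg hj, ih (j + 1) _ (fun q hq => hs q (List.mem_cons_of_mem _ hq))]
      simp [ht, ht']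
      omega

lemma map_pyGetD_range_eq_zip (r1 r2 : List Int) (h : r1.length ≤ r2.length)
    (f : Int → Int → Int) :
    (PySem.List.pyRange 0 (r1.length : Int) 1).map
        (fun i => f (PySem.List.pyGetD r1 i 0) (PySem.List.pyGetD r2 i 0))
      = (r1.zip r2).map (fun p => f p.1 p.2) := by
  apply List.ext_getElem
  · simp [PySem.List.length_pyRange_one]; omega
  · intro i h1 h2
    have hi : i < r1.length := by
      simpa [PySem.List.length_pyRange_one] using h1
    have hi2 : i < r2.length := lt_of_lt_of_le hi h
    simp [PySem.List.getElem_pyRange_one, PySem.List.pyGetD_natCast,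
      List.getElem_zip, List.getD_eq_getElem?_getD, hi, hi2]

-- insertBy keeps a list ordered for an asymmetric, transitive 'before'
lemma insertBy_pairwise {α : Type} (before : α → α → Bool)
    (hasym : ∀ a b, before a b = true → before b a = false)
    (htrans : ∀ a b c, before a b = true → before b c = true → before a c = true)
    (x : α) : ∀ (ys : List α), ys.Pairwise (fun a b => before b a = false) →
      (PySem.List.insertBy before x ys).Pairwise (fun a b => before b a = false) := by
  intro ys
  induction ys with
  | nil => intro _; simp [PySem.List.insertBy]
  | cons y ys ih =>
    intro hp
    rw [List.pairwise_cons] at hp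
    obtain ⟨hy, hys⟩ := hp
    by_cases hb : before x y = true
    · simp only [PySem.List.insertBy, hb, if_true]
      refine List.Pairwise.cons ?_ (List.Pairwise.cons hy hys)
      intro z hz
      rcases List.mem_cons.mp hz with rfl | hz
      · exact hasym _ _ hb
      · by_contra hzx
        have hzx' : before z x = true := by simpa using hzx
        have := htrans _ _ _ hzx' hb
        rw [hy z hz] at this; exact Bool.false_ne_true this
    · simp only [PySem.List.insertBy, if_neg hb]
      refine List.Pairwise.cons ?_ (ih hys)
      intro z hz
      rw [PySem.List.mem_insertBy] at hz
      rcases hz with rfl | hz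
      · exact Bool.eq_false_iff.mpr hb
      · exact hy z hz

lemma foldl_insertBy_pairwise {α : Type} (before : α → α → Bool)
    (hasym : ∀ a b, before a b = true → before b a = false)
    (htrans : ∀ a b c, before a b = true → before b c = true → before a c = true)
    (xs : List α) : ∀ (acc : List α), acc.Pairwise (fun a b => before b a = false) →
      (xs.foldl (fun acc x => PySem.List.insertBy before x acc) acc).Pairwise
        (fun a b => before b a = false) := by
  induction xs with
  | nil => intro acc h; simpa using h
  | cons x xs ih =>
    intro acc h
    simpa using ih _ (insertBy_pairwise before hasym htrans x acc h)

lemma sorted2_fst_antitone (xs : List (Int × Int)) :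
    (PySem.List.sorted2 xs (fun p => p.1) (fun p => p.2) true).Pairwise
      (fun a b => b.1 ≤ a.1) := by
  have h := foldl_insertBy_pairwise
    (fun a b : Int × Int => decide (b.1 < a.1) || (!decide (a.1 < b.1) && decide (b.2 < a.2)))
    (by intro a b hab; revert hab; simp; omega)
    (by intro a b c hab hbc; revert hab hbc; simp; omega)
    xs [] (by simp)
  have he : PySem.List.sorted2 xs (fun p => p.1) (fun p => p.2) true
      = xs.foldl (fun acc x => PySem.List.insertBy
          (fun a b : Int × Int => decide (b.1 < a.1) || (!decide (a.1 < b.1) && decide (b.2 < a.2))) x acc) [] := rfl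
  rw [he]
  refine h.imp ?_
  intro a b hab
  revert hab; simp; omega

lemma A_char (r1 r2 : List Int) (k : Int) (hpre : r1.length ≤ r2.length) :
    miceAndCheese r1 r2 k
      = ((r1.zip r2).map (fun p => p.2)).sum
        + ((pvSd ((r1.zip r2).map (fun p => p.1 - p.2))).take k.toNat).sum := by
  unfold miceAndCheese
  rw [PySem.List.foldl_append_singleton_eq_map, List.nil_append]
  set R : List (Int × Int) := (PySem.List.pyRange 0 (r1.length : Int) 1).map
      (fun i => (PySem.List.pyGetD r1 i 0 - PySem.List.pyGetD r2 i 0, i)) with hR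
  set s : List (Int × Int) := PySem.List.sorted2 R (fun p => p.1) (fun p => p.2) true with hs
  have hperm : s.Perm R := PySem.List.sorted2_perm ..
  have hloop : (PySem.List.pyRange 0 (s.length : Int) 1).foldl
      (fun acc i =>
        if i < k then acc + PySem.List.pyGetD r1 (PySem.List.pyGetD s i (0, 0)).2 0
        else acc + PySem.List.pyGetD r2 (PySem.List.pyGetD s i (0, 0)).2 0) 0
      = (PySem.List.enumerate s 0).foldl
          (fun acc ip => if ip.1 < k then acc + PySem.List.pyGetD r1 ip.2.2 0
            else acc + PySem.List.pyGetD r2 ip.2.2 0) 0 := by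
    rw [PySem.List.enumerate_eq_map_pyRange s (0, 0), List.foldl_map]
    rfl
  have hmem : ∀ p ∈ s, p.1 = (fun i => PySem.List.pyGetD r1 i 0) p.2 - (fun i => PySem.List.pyGetD r2 i 0) p.2 := by
    intro p hp
    have : p ∈ R := hperm.mem_iff.mp hp
    rw [hR] at this
    simp only [List.mem_map] at this
    obtain ⟨i, _, rfl⟩ := this
    simp
  have hval := loop_sum (fun i => PySem.List.pyGetD r1 i 0) (fun i => PySem.List.pyGetD r2 i 0) k s 0 0 hmem
  rw [hloop, hval]
  have hD : R.map (fun p => p.1) = (r1.zip r2).map (fun p => p.1 - p.2) := by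
    rw [hR, List.map_map]
    exact map_pyGetD_range_eq_zip r1 r2 hpre (fun a b => a - b)
  have hG : R.map (fun p => PySem.List.pyGetD r2 p.2 0) = (r1.zip r2).map (fun p => p.2) := by
    rw [hR, List.map_map]
    have := map_pyGetD_range_eq_zip r1 r2 hpre (fun a b => b)
    calc (PySem.List.pyRange 0 (r1.length : Int) 1).map
          ((fun p : Int × Int => PySem.List.pyGetD r2 p.2 0) ∘ (fun i => (PySem.List.pyGetD r1 i 0 - PySem.List.pyGetD r2 i 0, i)))
        = (PySem.List.pyRange 0 (r1.length : Int) 1).map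
          (fun i => (fun a b : Int => b) (PySem.List.pyGetD r1 i 0) (PySem.List.pyGetD r2 i 0)) := rfl
      _ = (r1.zip r2).map (fun p => (fun a b : Int => b) p.1 p.2) := this
      _ = (r1.zip r2).map (fun p => p.2) := rfl
  have hfst : s.map (fun p => p.1) = pvSd ((r1.zip r2).map (fun p => p.1 - p.2)) := by
    unfold pvSd
    apply PySem.List.eq_of_perm_of_pairwise_le_of_injective (fun x : Int => -x) neg_injective
    · exact ((hperm.map _).trans (hD ▸ List.Perm.refl _)).trans
        (PySem.List.sorted_perm _ _ _).symm
    · exact (List.pairwise_map.mpr ((sorted2_fst_antitone R).imp (fun h => by omega)))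
    · exact (PySem.List.sorted_pairwise_rev _ _).imp (fun h => by omega)
  have hsum : (s.map (fun p => PySem.List.pyGetD r2 p.2 0)).sum
      = ((r1.zip r2).map (fun p => p.2)).sum := by
    rw [← hG]; exact (hperm.map _).sum_eq
  rw [hsum, ← hfst]
  simp only [zero_add, sub_zero]

-- ===== VERDICT (by name: the statement is the Claim_ definition above) =====
theorem miceAndCheese_spec : Claim_equal_miceAndCheese := by
  intro r1 r2 k _ hpre
  unfold Spec_miceAndCheese
  rw [A_char r1 r2 k hpre]
  unfold miceAndCheese_alt
  rw [fold_pair k (r1.zip r2) 0 []]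
  simp only [zero_add]
  congr 1
  exact ((pool_inv k ((r1.zip r2).map (fun p => p.1 - p.2))).sum_eq).symm
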